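-- pv_equiv track=rewrite | github.com/ostadabbas/NNS-Detection-and-Segmentation | preprocessing/UtilTrim.py | outputInterval
-- ===== SOURCE A (Python) =====
-- def outputInterval(indexList, window):
--     """
--     calculate the starting frame index and ending frame index of the short clips by segmenting continuous windows on the
--     pacifier-NNS event label vector.
--     :param indexList: a binary vector in the length of the input long video as the pacifier-NNS label template.
--     :param window: frame number within the output short video clips.
--     :return: startList, endList of the sampled short video clips.
--     """
--     startList, endList = [], []
--
--     startIndex = 0
--     while startIndex + window <= len(indexList) - 1:
--         if indexList[startIndex + window] - indexList[startIndex] == window: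
--             startList.append(indexList[startIndex])
--             endList.append(indexList[startIndex + window])
--             startIndex += window
--         else:
--             startIndex += 1
--     return startList, endList
-- ===== SOURCE B (Python) =====
-- def outputInterval(indexList, window):
--     n = len(indexList)
--     valid = [i for i in range(n - window) if indexList[i + window] - indexList[i] == window]
--     startList, endList = [], []
--     nextStart = 0
--     for i in valid:
--         if i >= nextStart:
--             startList.append(indexList[i])
--             endList.append(indexList[i + window])
--             nextStart = i + window
--     return startList, endList
-- ===== Notes on version B (the rewrite author's own statement) =====
-- stated objective: alternative
-- what changed: Replaces A's single interleaved variable-stride while-loop with two phases: a filter that collects all window-aligned start positions, then a greedy watermark pass that selects the non-overlapping ones.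
-- outside the precondition, e.g. on outputInterval([], 0): A returns ([], []), B returns ([], [])
import Mathlib
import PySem

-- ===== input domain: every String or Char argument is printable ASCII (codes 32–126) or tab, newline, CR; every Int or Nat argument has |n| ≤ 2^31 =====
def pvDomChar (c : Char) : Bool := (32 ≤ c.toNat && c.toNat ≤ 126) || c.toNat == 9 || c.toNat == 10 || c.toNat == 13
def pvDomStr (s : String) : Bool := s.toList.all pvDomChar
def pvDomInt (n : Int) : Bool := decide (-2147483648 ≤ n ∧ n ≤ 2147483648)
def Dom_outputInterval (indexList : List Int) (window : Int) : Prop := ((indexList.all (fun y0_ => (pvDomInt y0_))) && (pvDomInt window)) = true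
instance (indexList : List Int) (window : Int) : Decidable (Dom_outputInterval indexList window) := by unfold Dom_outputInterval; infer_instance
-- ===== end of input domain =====

-- B replaces A's interleaved variable-stride while-loop by a filter of window-aligned
-- start positions followed by a greedy watermark selection; same cost, different decomposition.

-- ===== PORT A =====
-- A's while-loop as fuel recursion; within Pre_ (window ≥ 1) the loop makes at most
-- indexList.length iterations, so fuel = indexList.length is enough and the indexing is in range
-- (pyGetD's default is never used there).
def outAuxA (l : List Int) (w : Int) : Nat → Int → List Int → List Int → List Int × List Int
  | 0, _, s, e => (s, e)
  | f + 1, i, s, e =>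
    if i + w ≤ (l.length : Int) - 1 then
      if PySem.List.pyGetD l (i + w) 0 - PySem.List.pyGetD l i 0 == w then
        outAuxA l w f (i + w) (s ++ [PySem.List.pyGetD l i 0]) (e ++ [PySem.List.pyGetD l (i + w) 0])
      else
        outAuxA l w f (i + 1) s e
    else (s, e)

def outputInterval (indexList : List Int) (window : Int) : List Int × List Int :=
  outAuxA indexList window indexList.length 0 [] []

-- ===== PORT B =====
def validCond (l : List Int) (w i : Int) : Bool :=
  PySem.List.pyGetD l (i + w) 0 - PySem.List.pyGetD l i 0 == w

def goB (l : List Int) (w : Int) : List Int → Int → List Int → List Int → List Int × List Int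
  | [], _, s, e => (s, e)
  | i :: rest, ns, s, e =>
    if ns ≤ i then
      goB l w rest (i + w) (s ++ [PySem.List.pyGetD l i 0]) (e ++ [PySem.List.pyGetD l (i + w) 0])
    else goB l w rest ns s e

def outputInterval_alt (indexList : List Int) (window : Int) : List Int × List Int :=
  goB indexList window
    ((PySem.List.pyRange 0 ((indexList.length : Int) - window) 1).filter (validCond indexList window))
    0 [] []

-- ===== PRECONDITION & SPEC =====
-- Pre_ requires window ≥ 1: for window ≤ 0 the Python A never returns normally except on
-- ([], 0) — window = 0 makes A loop forever on any nonempty list, and a negative window makes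
-- A raise IndexError once startIndex walks past the end of the list (after negative-index
-- wraparound reads); B raises there too or returns the same ([] , []) on ([], 0).
def Pre_outputInterval (indexList : List Int) (window : Int) : Prop := 1 ≤ window
instance (indexList : List Int) (window : Int) : Decidable (Pre_outputInterval indexList window) := by unfold Pre_outputInterval; infer_instance
def pvWitness_outputInterval : List Int × Int := ([0, 1, 2, 3, 7], 2)

def Spec_outputInterval (indexList : List Int) (window : Int) (out : List Int × List Int) : Prop := out = outputInterval_alt indexList window
instance (indexList : List Int) (window : Int) (out : List Int × List Int) : Decidable (Spec_outputInterval indexList window out) := by unfold Spec_outputInterval; infer_instance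

-- ===== CLAIM (what is proved, stated in full; the proofs are below) =====
def Claim_equal_outputInterval : Prop := ∀ (indexList : List Int) (window : Int), Dom_outputInterval indexList window → Pre_outputInterval indexList window → Spec_outputInterval indexList window (outputInterval indexList window)

-- ===== LEMMAS AND PROOFS =====

-- watermark monotonicity: raising the watermark below every element changes nothing
theorem goB_watermark (l : List Int) (w : Int) (xs : List Int) (a b : Int) (s e : List Int)
    (hab : a ≤ b) (h : ∀ j ∈ xs, b ≤ j) :
    goB l w xs a s e = goB l w xs b s e := by
  cases xs with
  | nil => rfl
  | cons j rest =>
    have hbj : b ≤ j := h j (by simp)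
    have haj : a ≤ j := le_trans hab hbj
    simp [goB, haj, hbj]

-- skipping: valid positions strictly below the watermark are never selected
theorem goB_skip (l : List Int) (w : Int) (m : Int) :
    ∀ (k : Nat) (a ns : Int) (s e : List Int), a + k ≤ ns →
    goB l w ((PySem.List.pyRange a m 1).filter (validCond l w)) ns s e
      = goB l w ((PySem.List.pyRange (a + k) m 1).filter (validCond l w)) ns s e := by
  intro k
  induction k with
  | zero => intro a ns s e _; simp
  | succ k ih =>
    intro a ns s e h
    have h' : (a + 1) + (k : Int) ≤ ns := by push_cast at h; omega
    have hb : a + (((k : Nat) + 1 : Nat) : Int) = (a + 1) + (k : Int) := by push_cast; ring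
    rw [hb]
    by_cases ham : a < m
    · rw [PySem.List.pyRange_one_cons ham]
      have hans : ¬ ns ≤ a := by omega
      have step : goB l w ((a :: PySem.List.pyRange (a+1) m 1).filter (validCond l w)) ns s e
          = goB l w ((PySem.List.pyRange (a+1) m 1).filter (validCond l w)) ns s e := by
        cases hv : validCond l w a with
        | true => simp [List.filter, hv, goB, hans]
        | false => simp [List.filter, hv]
      rw [step]
      exact ih (a+1) ns s e h'
    · rw [PySem.List.pyRange_one_eq_nil (by omega), PySem.List.pyRange_one_eq_nil (by omega)]

-- main loop correspondence: A's loop from index i equals B's greedy pass over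
-- the valid positions in [i, n - w) with watermark i
theorem loop_eq (l : List Int) (w : Int) (hw : 1 ≤ w) :
    ∀ (f : Nat) (i : Int) (s e : List Int), 0 ≤ i →
    ((l.length : Int) - w - i).toNat ≤ f →
    outAuxA l w f i s e
      = goB l w ((PySem.List.pyRange i ((l.length : Int) - w) 1).filter (validCond l w)) i s e := by
  intro f
  induction f with
  | zero =>
    intro i s e hi hf
    rw [PySem.List.pyRange_one_eq_nil (by omega)]
    rfl
  | succ f ih =>
    intro i s e hi hf
    by_cases hcond : i + w ≤ (l.length : Int) - 1
    · have him : i < (l.length : Int) - w := by omega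
      rw [PySem.List.pyRange_one_cons him]
      cases hv : validCond l w i with
      | true =>
        have hvB : PySem.List.pyGetD l (i + w) 0 - PySem.List.pyGetD l i 0 == w := hv
        rw [show outAuxA l w (f+1) i s e
              = outAuxA l w f (i + w) (s ++ [PySem.List.pyGetD l i 0]) (e ++ [PySem.List.pyGetD l (i + w) 0]) by
            simp [outAuxA, hcond, hvB]]
        have hfw : ((l.length : Int) - w - (i + w)).toNat ≤ f := by omega
        rw [ih (i + w) (s ++ [PySem.List.pyGetD l i 0]) (e ++ [PySem.List.pyGetD l (i + w) 0]) (by omega) hfw]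
        have hrhs : goB l w ((i :: PySem.List.pyRange (i+1) ((l.length : Int) - w) 1).filter (validCond l w)) i s e
            = goB l w ((PySem.List.pyRange (i+1) ((l.length : Int) - w) 1).filter (validCond l w)) (i + w)
                (s ++ [PySem.List.pyGetD l i 0]) (e ++ [PySem.List.pyGetD l (i + w) 0]) := by
          simp [List.filter, hv, goB]
        have hiw : (i + 1) + (((w - 1).toNat : Nat) : Int) = i + w := by omega
        rw [hrhs, goB_skip l w _ (w - 1).toNat (i+1) (i+w) _ _ (by omega), hiw]
      | false =>
        have hvB : ¬ (PySem.List.pyGetD l (i + w) 0 - PySem.List.pyGetD l i 0 == w) := by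
          simp_all [validCond]
        rw [show outAuxA l w (f+1) i s e = outAuxA l w f (i + 1) s e by
            simp [outAuxA, hcond, hvB]]
        rw [ih (i + 1) s e (by omega) (by omega)]
        have hfil : (i :: PySem.List.pyRange (i+1) ((l.length : Int) - w) 1).filter (validCond l w)
            = (PySem.List.pyRange (i+1) ((l.length : Int) - w) 1).filter (validCond l w) := by
          simp [List.filter, hv]
        rw [hfil]
        refine (goB_watermark l w _ i (i+1) s e (by omega) ?_).symm
        intro j hj
        have := (PySem.List.mem_pyRange_one.mp (List.mem_of_mem_filter hj)).1
        omega
    · rw [PySem.List.pyRange_one_eq_nil (by omega)]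
      simp [outAuxA, hcond, goB]

-- ===== VERDICT (by name: the statement is the Claim_ definition above) =====
theorem outputInterval_spec : Claim_equal_outputInterval := by
  intro l w _ hw
  have hw1 : 1 ≤ w := hw
  unfold Spec_outputInterval outputInterval outputInterval_alt
  rw [loop_eq l w hw1 l.length 0 [] [] (by omega) (by omega)]
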